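-- pv_equiv track=rewrite | github.com/franklinscott13/GarbageToData | KinCodeTest/getpolicynumbers.py | extract_digit_blocks
-- ===== SOURCE A (Python) =====
-- def extract_digit_blocks(drawing):
--     lines = drawing.split('\n')
--     num_digits = len(lines[0]) // 4  # Each digit block is 3 characters wide + 1 space
--     digit_blocks = []
--
--     for i in range(num_digits):
--         block = [line[i*4:i*4+3] for line in lines if line.strip()]
--         digit_blocks.append(block)
--
--     return digit_blocks
-- ===== SOURCE B (Python) =====
-- def extract_digit_blocks(drawing):
--     lines = drawing.split('\n')
--     num_digits = len(lines[0]) // 4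
--     rows = [[line[4*i:4*i+3] for i in range(num_digits)] for line in lines if line.strip()]
--     if not rows:
--         return [[] for _ in range(num_digits)]
--     return [list(col) for col in zip(*rows)]
-- ===== Notes on version B (the rewrite author's own statement) =====
-- stated objective: alternative
-- what changed: B filters the blank lines once and builds a row-major list of 3-char chunks per surviving line, then transposes it with zip(*rows) to get the per-digit blocks, instead of A's per-digit loop that rescans and re-filters all lines for every digit index.
import Mathlib
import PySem

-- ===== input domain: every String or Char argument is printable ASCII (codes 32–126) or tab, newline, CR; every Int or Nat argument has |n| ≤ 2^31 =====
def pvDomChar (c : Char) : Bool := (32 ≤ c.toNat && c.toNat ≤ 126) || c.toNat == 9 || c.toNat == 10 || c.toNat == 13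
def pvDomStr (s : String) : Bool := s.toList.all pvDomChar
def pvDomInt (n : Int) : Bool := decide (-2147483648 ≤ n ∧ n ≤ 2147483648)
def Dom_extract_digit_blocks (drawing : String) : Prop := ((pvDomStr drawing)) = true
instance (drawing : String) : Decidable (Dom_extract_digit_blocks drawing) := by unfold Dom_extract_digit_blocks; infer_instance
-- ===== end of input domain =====

-- B filters blank lines once, builds row-major chunk lists and transposes them (zip(*rows)),
-- instead of A's per-digit rescans of all lines: alternative decomposition, same exact output.


-- ===== PORT A =====
def extract_digit_blocks (drawing : String) : List (List String) :=
  -- sep "\n" ≠ "", so split? is always `some`; str.split always returns a nonempty list, so lines[0] never raises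
  let lines : List String := (PySem.Str.split? drawing "\n").getD [drawing]
  let num_digits : Int := PySem.Int.floordiv (PySem.Str.len (lines.headD "")) 4
  (PySem.List.pyRange 0 num_digits 1).foldl
    (fun acc i =>
      acc ++ [(lines.filter (fun line => !(PySem.Str.strip line).isEmpty)).map
                (fun line => PySem.Str.slice line (some (i * 4)) (some (i * 4 + 3)))])
    []

-- ===== PORT B =====
-- zip(*rows) followed by list(...) on each tuple: columns until the shortest row is exhausted
def pvZipStar (rows : List (List String)) : List (List String) :=
  match rows with
  | [] => []
  | r :: rs =>
      if (r :: rs).any List.isEmpty then []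
      else ((r :: rs).map (fun l => l.headD "")) :: pvZipStar ((r :: rs).map List.tail)
termination_by (rows.headD []).length
decreasing_by
  simp_all
  cases r with
  | nil => simp_all
  | cons a as => simp

def extract_digit_blocks_alt (drawing : String) : List (List String) :=
  -- sep "\n" ≠ "", so split? is always `some`; str.split always returns a nonempty list, so lines[0] never raises
  let lines : List String := (PySem.Str.split? drawing "\n").getD [drawing]
  let num_digits : Int := PySem.Int.floordiv (PySem.Str.len (lines.headD "")) 4
  let rows := (lines.filter (fun line => !(PySem.Str.strip line).isEmpty)).map (fun line =>
    (PySem.List.pyRange 0 num_digits 1).map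
      (fun i => PySem.Str.slice line (some (4 * i)) (some (4 * i + 3))))
  if rows.isEmpty then (PySem.List.pyRange 0 num_digits 1).map (fun _ => [])
  else pvZipStar rows

-- ===== PRECONDITION & SPEC =====
def Spec_extract_digit_blocks (drawing : String) (out : List (List String)) : Prop := out = extract_digit_blocks_alt drawing
instance (drawing : String) (out : List (List String)) : Decidable (Spec_extract_digit_blocks drawing out) := by unfold Spec_extract_digit_blocks; infer_instance

-- ===== CLAIM (what is proved, stated in full; the proofs are below) =====
def Claim_equal_extract_digit_blocks : Prop := ∀ (drawing : String), Dom_extract_digit_blocks drawing → Spec_extract_digit_blocks drawing (extract_digit_blocks drawing)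

-- ===== LEMMAS AND PROOFS =====

-- transposing a rectangular row-major grid (one row per element of a NONEMPTY l, one column per m ∈ ms)
-- yields the column-major grid
theorem pvZipStar_map_map {α : Type} (g : α → Int → String) :
    ∀ (ms : List Int) (l : List α), l ≠ [] →
      pvZipStar (l.map (fun x => ms.map (g x))) = ms.map (fun i => l.map (fun x => g x i)) := by
  intro ms
  induction ms with
  | nil =>
      intro l hl
      cases l with
      | nil => simp at hl
      | cons x xs => simp [pvZipStar]
  | cons m ms ih =>
      intro l hl
      cases l with
      | nil => simp at hl
      | cons x xs =>
          rw [List.map_cons]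
          rw [pvZipStar]
          have hany : ((m :: ms).map (g x) :: xs.map (fun x => (m :: ms).map (g x))).any List.isEmpty = false := by
            simp [List.any_eq_false]
          rw [hany]
          simp only [Bool.false_eq_true, if_false]
          have hIH := ih (x :: xs) (by simp)
          simp only [List.map_cons] at hIH
          simp only [List.map_map, Function.comp_def, List.tail_cons, List.headD_cons, List.map_cons]
          rw [hIH]

theorem extract_digit_blocks_spec : Claim_equal_extract_digit_blocks := by
  intro drawing _
  unfold Spec_extract_digit_blocks extract_digit_blocks extract_digit_blocks_alt
  simp only []
  set lines : List String := (PySem.Str.split? drawing "\n").getD [drawing] with hlines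
  set nd : Int := PySem.Int.floordiv (PySem.Str.len (lines.headD "")) 4 with hnd
  set filtered := lines.filter (fun line => !(PySem.Str.strip line).isEmpty) with hf
  rw [PySem.List.foldl_append_singleton_eq_map]
  by_cases hemp : filtered.isEmpty
  · rw [List.isEmpty_iff] at hemp
    rw [hemp]
    simp
  · have hrows : (filtered.map (fun line =>
        (PySem.List.pyRange 0 nd 1).map
          (fun i => PySem.Str.slice line (some (4 * i)) (some (4 * i + 3))))).isEmpty = false := by
      rw [List.isEmpty_iff] at hemp
      simp [hemp]
    rw [hrows]
    simp only [Bool.false_eq_true, if_false]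
    rw [List.isEmpty_iff] at hemp
    rw [pvZipStar_map_map (fun line i => PySem.Str.slice line (some (4 * i)) (some (4 * i + 3)))
      (PySem.List.pyRange 0 nd 1) filtered hemp]
    simp [mul_comm]
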